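-- pv_equiv track=rewrite | github.com/Frokker/AlgoritmsURFU | solutions/task_22_billionaires.py | billionaires
-- ===== SOURCE A (Python) =====
-- from collections import defaultdict
--
-- def billionaires(n, billionaires_data, m, movements):
--     # --- Инициализация ---
--     person_city = {}     # имя → текущий город
--     person_wealth = {}   # имя → капитал
--     city_wealth = defaultdict(int)  # город → суммарный капитал
--
--     for name, city, wealth in billionaires_data:
--         person_city[name] = city
--         person_wealth[name] = wealth
--         city_wealth[city] += wealth
--
--     # Группируем перемещения по дням для быстрого доступа
--     moves_by_day = defaultdict(list)
--     for day, name, dest in movements: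
--         moves_by_day[day].append((name, dest))
--
--     days_led = defaultdict(int)  # город → сколько дней лидировал
--
--     # --- Симуляция по дням ---
--     for day in range(1, m + 1):
--         # Определяем лидера — город с максимальным капиталом
--         if city_wealth:
--             max_w = max(city_wealth.values())
--             if max_w > 0:
--                 for city, w in city_wealth.items():
--                     if w == max_w:
--                         days_led[city] += 1
--
--         # Применяем перемещения в конце дня
--         if day in moves_by_day:
--             for name, new_city in moves_by_day[day]:
--                 old_city = person_city[name]
--                 if old_city == new_city:
--                     continue
--                 w = person_wealth[name]
--                 # Переносим капитал из старого города в новый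
--                 city_wealth[old_city] -= w
--                 if city_wealth[old_city] == 0:
--                     del city_wealth[old_city]
--                 city_wealth[new_city] += w
--                 person_city[name] = new_city
--
--     # Возвращаем отсортированный по алфавиту словарь
--     return dict(sorted(days_led.items()))
-- ===== SOURCE B (Python) =====
-- def billionaires(n, billionaires_data, m, movements):
--     person_city = {name: city for name, city, _w in billionaires_data}
--     person_wealth = {name: w for name, _c, w in billionaires_data}
--     city_wealth = {}
--     for _name, city, w in billionaires_data:
--         city_wealth[city] = city_wealth.get(city, 0) + w
--
--     days_led = {}
--
--     def credit(k):
--         # standings are frozen for k consecutive days: award them all at once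
--         if city_wealth:
--             mx = max(city_wealth.values())
--             if mx > 0:
--                 for c in [c for c, w in city_wealth.items() if w == mx]:
--                     days_led[c] = days_led.get(c, 0) + k
--
--     # one flat pass over the effective movements in day order (stable sort)
--     cur = 1
--     for day, name, dest in sorted((t for t in movements if 1 <= t[0] <= m), key=lambda t: t[0]):
--         if cur <= day:
--             credit(day - cur + 1)
--             cur = day + 1
--         old = person_city[name]
--         if old != dest:
--             w = person_wealth[name]
--             rem = city_wealth.get(old, 0) - w
--             if rem == 0:
--                 city_wealth.pop(old, None)
--             else:
--                 city_wealth[old] = rem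
--             city_wealth[dest] = city_wealth.get(dest, 0) + w
--             person_city[name] = dest
--     if cur <= m:
--         credit(m - cur + 1)
--     return dict(sorted(days_led.items()))
-- ===== Notes on version B (the rewrite author's own statement) =====
-- stated objective: faster
-- what changed: B replaces A's day-by-day simulation (one leader scan per day, movements pre-grouped into a dict) by a single pass over the movement events sorted by day: between consecutive movement days the standings are frozen, so B credits each whole gap of days in one leader scan, and applies each movement directly from the flat sorted stream; leaders are thus recomputed only O(#movements) times instead of m times.
import Mathlib
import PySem

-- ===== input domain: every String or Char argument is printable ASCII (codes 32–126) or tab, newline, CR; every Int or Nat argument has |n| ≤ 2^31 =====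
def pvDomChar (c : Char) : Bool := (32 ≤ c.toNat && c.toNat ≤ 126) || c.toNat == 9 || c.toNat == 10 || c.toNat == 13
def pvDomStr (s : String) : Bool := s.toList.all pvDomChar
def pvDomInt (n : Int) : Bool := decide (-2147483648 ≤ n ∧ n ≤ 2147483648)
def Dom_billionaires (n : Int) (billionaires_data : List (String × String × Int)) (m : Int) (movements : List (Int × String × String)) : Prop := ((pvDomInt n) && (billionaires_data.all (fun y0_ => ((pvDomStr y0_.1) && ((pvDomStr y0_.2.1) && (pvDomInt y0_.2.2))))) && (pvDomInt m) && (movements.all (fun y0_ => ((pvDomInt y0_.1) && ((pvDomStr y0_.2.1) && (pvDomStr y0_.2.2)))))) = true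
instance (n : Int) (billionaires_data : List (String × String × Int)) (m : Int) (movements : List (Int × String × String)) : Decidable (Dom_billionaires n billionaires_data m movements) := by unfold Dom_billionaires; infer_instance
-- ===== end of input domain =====

-- B replaces the day-by-day simulation by one pass over the movement events sorted by day,
-- crediting each movement-free gap of days in a single leader scan (measurably faster when m
-- far exceeds the number of movement days).

-- ===== PORT A =====
-- initialisation loop: person→city, person→wealth, city→total wealth (defaultdict(int) += )
def pvInitA (billionaires_data : List (String × String × Int)) :
    PySem.Dict String String × PySem.Dict String Int × PySem.Dict String Int :=
  billionaires_data.foldl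
    (fun t p => (t.1.insert p.1 p.2.1, t.2.1.insert p.1 p.2.2,
                 t.2.2.insert p.2.1 (t.2.2.getD p.2.1 0 + p.2.2)))
    (PySem.Dict.empty, PySem.Dict.empty, PySem.Dict.empty)

-- the leader-crediting block of one simulated day (`if city_wealth: … days_led[city] += 1`)
def pvCreditA (cw dl : PySem.Dict String Int) : PySem.Dict String Int :=
  match PySem.List.max? cw.values (fun x => x) with
  | none => dl
  | some mx =>
    if 0 < mx then
      cw.items.foldl (fun dl p => if p.2 = mx then dl.insert p.1 (dl.getD p.1 0 + 1) else dl) dl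
    else dl

-- one movement (name, dest); person_city[name] raises KeyError when absent — excluded by Pre_
def pvApplyA (pw : PySem.Dict String Int)
    (s : PySem.Dict String String × PySem.Dict String Int) (mv : String × String) :
    PySem.Dict String String × PySem.Dict String Int :=
  let old := s.1.getD mv.1 ""
  if old = mv.2 then s
  else
    let w := pw.getD mv.1 0
    let cw1 := s.2.insert old (s.2.getD old 0 - w)
    let cw2 := if cw1.getD old 0 = 0 then cw1.erase old else cw1
    let cw3 := cw2.insert mv.2 (cw2.getD mv.2 0 + w)
    (s.1.insert mv.1 mv.2, cw3)

-- the body of `for day in range(1, m + 1)`; state = (person_city, city_wealth, days_led)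
def pvStepA (pw : PySem.Dict String Int) (mbd : PySem.Dict Int (List (String × String)))
    (st : PySem.Dict String String × PySem.Dict String Int × PySem.Dict String Int)
    (day : Int) :
    PySem.Dict String String × PySem.Dict String Int × PySem.Dict String Int :=
  let dl := pvCreditA st.2.1 st.2.2
  if mbd.contains day then
    let pcw := (mbd.getD day []).foldl (pvApplyA pw) (st.1, st.2.1)
    (pcw.1, pcw.2, dl)
  else (st.1, st.2.1, dl)

def billionaires (n : Int) (billionaires_data : List (String × String × Int)) (m : Int)
    (movements : List (Int × String × String)) : List (String × Int) :=
  let ini := pvInitA billionaires_data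
  -- moves_by_day: defaultdict(list) append
  let mbd : PySem.Dict Int (List (String × String)) :=
    movements.foldl (fun d t => d.modify t.1 [] (· ++ [(t.2.1, t.2.2)])) PySem.Dict.empty
  let fin := (PySem.List.pyRange 1 (m + 1)).foldl (pvStepA ini.2.1 mbd)
    (ini.1, ini.2.2, PySem.Dict.empty)
  -- dict(sorted(days_led.items())) — tuples compare lexicographically
  PySem.List.sorted2 fin.2.2.items (fun p => p.1) (fun p => p.2)

-- ===== PORT B =====
-- the three dict comprehensions / accumulation loop of Source B
def pvPCB (billionaires_data : List (String × String × Int)) : PySem.Dict String String :=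
  billionaires_data.foldl (fun d p => d.insert p.1 p.2.1) PySem.Dict.empty

def pvPWB (billionaires_data : List (String × String × Int)) : PySem.Dict String Int :=
  billionaires_data.foldl (fun d p => d.insert p.1 p.2.2) PySem.Dict.empty

def pvCWB (billionaires_data : List (String × String × Int)) : PySem.Dict String Int :=
  billionaires_data.foldl (fun d p => d.insert p.2.1 (d.getD p.2.1 0 + p.2.2)) PySem.Dict.empty

-- credit(k): the standings are frozen for k consecutive days; leaders collected first, then bumped
def pvCreditB (cw : PySem.Dict String Int) (k : Int) (dl : PySem.Dict String Int) :
    PySem.Dict String Int :=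
  match PySem.List.max? cw.values (fun x => x) with
  | none => dl
  | some mx =>
    if 0 < mx then
      ((cw.items.filter (fun p => decide (p.2 = mx))).map (fun p => p.1)).foldl
        (fun dl c => dl.insert c (dl.getD c 0 + k)) dl
    else dl

-- the move body of Source B: subtract-or-drop the old city, then add to the destination;
-- person_city[name] raises KeyError when absent — excluded by Pre_
def pvMoveB (pw : PySem.Dict String Int)
    (s : PySem.Dict String String × PySem.Dict String Int) (name dest : String) :
    PySem.Dict String String × PySem.Dict String Int :=
  let old := s.1.getD name ""
  if old ≠ dest then
    let w := pw.getD name 0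
    let rem := s.2.getD old 0 - w
    let cw := if rem = 0 then s.2.erase old else s.2.insert old rem
    (s.1.insert name dest, cw.insert dest (cw.getD dest 0 + w))
  else s

-- one event of the flat sorted stream: catch-up credit when a new day starts, then the move;
-- state = (person_city, city_wealth, days_led, cur)
def pvEventB (pw : PySem.Dict String Int)
    (st : PySem.Dict String String × PySem.Dict String Int × PySem.Dict String Int × Int)
    (t : Int × String × String) :
    PySem.Dict String String × PySem.Dict String Int × PySem.Dict String Int × Int :=
  match st with
  | (pc, cw, dl, cur) =>
    let dc := if cur ≤ t.1 then (pvCreditB cw (t.1 - cur + 1) dl, t.1 + 1) else (dl, cur)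
    let s := pvMoveB pw (pc, cw) t.2.1 t.2.2
    (s.1, s.2, dc.1, dc.2)

def billionaires_alt (n : Int) (billionaires_data : List (String × String × Int)) (m : Int)
    (movements : List (Int × String × String)) : List (String × Int) :=
  let pc := pvPCB billionaires_data
  let pw := pvPWB billionaires_data
  let cw := pvCWB billionaires_data
  -- sorted((t for t in movements if 1 <= t[0] <= m), key=lambda t: t[0]) — stable
  let rel := PySem.List.sorted
    (movements.filter (fun t => decide (1 ≤ t.1 ∧ t.1 ≤ m))) (fun t => t.1)
  let r := rel.foldl (pvEventB pw) (pc, cw, PySem.Dict.empty, 1)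
  let dl := if r.2.2.2 ≤ m then pvCreditB r.2.1 (m - r.2.2.2 + 1) r.2.2.1 else r.2.2.1
  PySem.List.sorted2 dl.items (fun p => p.1) (fun p => p.2)

-- ===== PRECONDITION & SPEC =====
-- Pre_ excludes inputs where a movement that is actually applied (its day lies in 1..m) names a
-- person absent from billionaires_data: there A (and B alike) raises KeyError.
def Pre_billionaires (n : Int) (billionaires_data : List (String × String × Int)) (m : Int)
    (movements : List (Int × String × String)) : Prop :=
  ∀ mv ∈ movements, 1 ≤ mv.1 → mv.1 ≤ m → mv.2.1 ∈ billionaires_data.map (fun p => p.1)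
instance (n : Int) (billionaires_data : List (String × String × Int)) (m : Int) (movements : List (Int × String × String)) : Decidable (Pre_billionaires n billionaires_data m movements) := by unfold Pre_billionaires; infer_instance

def pvWitness_billionaires : Int × (List (String × String × Int)) × Int × (List (Int × String × String)) :=
  (2, [("alice", "X", 3), ("bob", "Y", 5)], 4, [(2, "bob", "X"), (9, "zed", "X")])

def Spec_billionaires (n : Int) (billionaires_data : List (String × String × Int)) (m : Int) (movements : List (Int × String × String)) (out : List (String × Int)) : Prop := out = billionaires_alt n billionaires_data m movements
instance (n : Int) (billionaires_data : List (String × String × Int)) (m : Int) (movements : List (Int × String × String)) (out : List (String × Int)) : Decidable (Spec_billionaires n billionaires_data m movements out) := by unfold Spec_billionaires; infer_instance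

-- ===== CLAIM (what is proved, stated in full; the proofs are below) =====
def Claim_equal_billionaires : Prop := ∀ (n : Int) (billionaires_data : List (String × String × Int)) (m : Int) (movements : List (Int × String × String)), Dom_billionaires n billionaires_data m movements → Pre_billionaires n billionaires_data m movements → Spec_billionaires n billionaires_data m movements (billionaires n billionaires_data m movements)

-- ===== LEMMAS AND PROOFS =====

-- B's move body computes exactly A's (insert-then-erase of the emptied city collapses to erase)
theorem pvFilter_overwrite {κ ν : Type} [BEq κ] [LawfulBEq κ] (k : κ) (v : ν)
    (l : List (κ × ν)) :
    (l.map (fun p => if p.1 == k then (k, v) else p)).filter (fun p => !(p.1 == k))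
      = l.filter (fun p => !(p.1 == k)) := by
  induction l with
  | nil => rfl
  | cons p l ih => by_cases h : p.1 = k <;> simp [h, ih]

theorem pvErase_insert {κ ν : Type} [BEq κ] [LawfulBEq κ] (d : PySem.Dict κ ν) (k : κ) (v : ν) :
    (d.insert k v).erase k = d.erase k := by
  apply PySem.Dict.ext
  by_cases h : d.contains k
  · simp only [PySem.Dict.insert, PySem.Dict.erase, h, if_true]
    exact pvFilter_overwrite k v d.items
  · simp [PySem.Dict.insert, PySem.Dict.erase, h, List.filter_append]

theorem pvMoveB_eq (pw : PySem.Dict String Int)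
    (s : PySem.Dict String String × PySem.Dict String Int) (name dest : String) :
    pvMoveB pw s name dest = pvApplyA pw s (name, dest) := by
  unfold pvMoveB pvApplyA
  by_cases h : s.1.getD name "" = dest
  · simp [h]
  · simp only [h, ne_eq, not_false_eq_true, if_true, if_false]
    rw [PySem.Dict.getD_insert_self]
    by_cases h0 : s.2.getD (s.1.getD name "") 0 - pw.getD name 0 = 0
    · simp only [h0, if_true]
      rw [pvErase_insert]
    · simp only [h0, if_false]

-- ---- crediting: both credits are 'add j to every current leader' ----
def pvBump (M : List String) (j : Int) (p : String × Int) : String × Int :=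
  if p.1 ∈ M then (p.1, p.2 + j) else p

def pvAddAll (M : List String) (j : Int) (dl : PySem.Dict String Int) : PySem.Dict String Int :=
  M.foldl (fun dl c => dl.insert c (dl.getD c 0 + j)) dl

theorem pvBump_nil (j : Int) (p : String × Int) : pvBump [] j p = p := by simp [pvBump]

theorem pvBump_mem {M : List String} {p : String × Int} (j : Int) (h : p.1 ∈ M) :
    pvBump M j p = (p.1, p.2 + j) := by simp [pvBump, h]

theorem pvBump_not_mem {M : List String} {p : String × Int} (j : Int) (h : p.1 ∉ M) :
    pvBump M j p = p := by simp [pvBump, h]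

theorem pvItems_addAll (M : List String) (j : Int) (dl : PySem.Dict String Int)
    (hM : M.Nodup) (hd : dl.keys.Nodup) :
    (pvAddAll M j dl).items =
      dl.items.map (pvBump M j) ++
        (M.filter (fun c => !(dl.keys.contains c))).map (fun c => (c, j)) := by
  induction M generalizing dl with
  | nil =>
    rw [show pvBump ([] : List String) j = id from funext (pvBump_nil j)]
    simp [pvAddAll]
  | cons c M ih =>
    obtain ⟨hcM, hM'⟩ := List.nodup_cons.mp hM
    have hstep : pvAddAll (c :: M) j dl = pvAddAll M j (dl.insert c (dl.getD c 0 + j)) := rfl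
    rw [hstep, ih _ hM' (PySem.Dict.nodup_keys_insert _ _ _ hd)]
    cases hc : dl.contains c with
    | true =>
      have hckeys : c ∈ dl.keys := (PySem.Dict.contains_iff_mem_keys _ _).mp hc
      rw [PySem.Dict.items_insert_of_contains _ _ hc, PySem.Dict.keys_insert_of_contains _ _ hc,
        List.map_map]
      have hfil : List.filter (fun x => !dl.keys.contains x) (c :: M)
          = List.filter (fun x => !dl.keys.contains x) M := by
        simp [List.filter_cons, hckeys]
      rw [hfil]
      congr 1
      apply List.map_congr_left
      intro p hp
      by_cases hpc : p.1 = c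
      · have hpv : dl.getD p.1 0 = p.2 := PySem.Dict.getD_of_mem_items dl hp hd 0
        have hpeq : p = (c, p.2) := by rw [← hpc]
        simp only [Function.comp_apply, hpc, BEq.rfl, if_true]
        rw [pvBump_not_mem j hcM]
        rw [pvBump_mem j (by rw [hpc]; exact List.mem_cons_self)]
        rw [hpc] at hpv
        rw [hpeq, hpv]
      · have : (p.1 == c) = false := by simpa using hpc
        simp only [Function.comp_apply, this, Bool.false_eq_true, if_false]
        by_cases hpm : p.1 ∈ M
        · rw [pvBump_mem j hpm, pvBump_mem j (List.mem_cons_of_mem _ hpm)]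
        · rw [pvBump_not_mem j hpm, pvBump_not_mem j (by simp [hpc, hpm])]
    | false =>
      have hckeys : c ∉ dl.keys := fun h =>
        by simp [(PySem.Dict.contains_iff_mem_keys dl c).mpr h] at hc
      have hgd : dl.getD c 0 = 0 := PySem.Dict.getD_of_not_contains dl 0 hc
      rw [PySem.Dict.items_insert_of_not_contains _ _ hc,
        PySem.Dict.keys_insert_of_not_contains _ _ hc, List.filter_cons]
      have hcont : dl.keys.contains c = false := by
        simpa [List.contains_iff_mem] using hckeys
      simp only [hcont, Bool.not_false, if_pos rfl]
      rw [List.map_append, List.map_cons, List.map_nil, hgd]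
      have hmap : dl.items.map (pvBump M j) = dl.items.map (pvBump (c :: M) j) := by
        apply List.map_congr_left
        intro p hp
        have hpc : p.1 ≠ c := by
          intro h
          exact hckeys (h ▸ (by
            have : p.1 ∈ dl.items.map Prod.fst := List.mem_map_of_mem hp
            simpa [PySem.Dict.keys] using this))
        by_cases hpm : p.1 ∈ M
        · rw [pvBump_mem j hpm, pvBump_mem j (List.mem_cons_of_mem _ hpm)]
        · rw [pvBump_not_mem j hpm, pvBump_not_mem j (by simp [hpc, hpm])]
      have hfil : M.filter (fun x => !(dl.keys ++ [c]).contains x)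
          = M.filter (fun x => !dl.keys.contains x) := by
        apply List.filter_congr
        intro x hx
        have hxc : x ≠ c := fun h => hcM (h ▸ hx)
        simp [List.contains_iff_mem, hxc]
      rw [hmap, hfil]
      rw [pvBump_not_mem j hcM]
      simp [List.filter_cons, hckeys, ← List.append_cons]

theorem pvBump_fst (M : List String) (j : Int) (p : String × Int) :
    (pvBump M j p).1 = p.1 := by
  unfold pvBump; split <;> rfl

theorem pvKeys_addAll (M : List String) (j : Int) (dl : PySem.Dict String Int)
    (hM : M.Nodup) (hd : dl.keys.Nodup) :
    (pvAddAll M j dl).keys = dl.keys ++ M.filter (fun c => !(dl.keys.contains c)) := by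
  have h := pvItems_addAll M j dl hM hd
  simp only [PySem.Dict.keys] at *
  rw [h, List.map_append, List.map_map, List.map_map]
  congr 1
  · exact List.map_congr_left (fun p _ => pvBump_fst M j p)
  · simp [Function.comp_def]

theorem pvNodup_keys_addAll (M : List String) (j : Int) (dl : PySem.Dict String Int)
    (hd : dl.keys.Nodup) : (pvAddAll M j dl).keys.Nodup :=
  PySem.Dict.nodup_keys_foldl_insert M (fun dl c => dl.getD c 0 + j) dl hd

theorem pvAddAll_addAll (M : List String) (j : Int) (dl : PySem.Dict String Int)
    (hM : M.Nodup) (hd : dl.keys.Nodup) :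
    pvAddAll M 1 (pvAddAll M j dl) = pvAddAll M (j + 1) dl := by
  apply PySem.Dict.ext
  have hd1 : (pvAddAll M j dl).keys.Nodup := pvNodup_keys_addAll M j dl hd
  rw [pvItems_addAll M 1 _ hM hd1, pvItems_addAll M j dl hM hd, pvItems_addAll M (j+1) dl hM hd]
  have hk := pvKeys_addAll M j dl hM hd
  have hfil : M.filter (fun c => !((pvAddAll M j dl).keys.contains c)) = [] := by
    rw [List.filter_eq_nil_iff]
    intro c hcM
    rw [hk]
    by_cases hck : c ∈ dl.keys <;> simp [List.contains_iff_mem, hck, List.mem_filter, hcM]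
  rw [hfil, List.map_nil, List.append_nil, List.map_append, List.map_map, List.map_map]
  congr 1
  · apply List.map_congr_left
    intro p _
    by_cases hpm : p.1 ∈ M
    · rw [Function.comp_apply, pvBump_mem j hpm, pvBump_mem 1 (p := (p.1, p.2 + j)) hpm,
        pvBump_mem (j+1) hpm]
      simp [add_assoc]
    · rw [Function.comp_apply, pvBump_not_mem j hpm, pvBump_not_mem 1 hpm,
        pvBump_not_mem (j+1) hpm]
  · apply List.map_congr_left
    intro c hcf
    have hcm : c ∈ M := (List.mem_filter.mp hcf).1
    rw [Function.comp_apply, pvBump_mem 1 (p := (c, j)) hcm]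

def pvMaxKeys (cw : PySem.Dict String Int) (mx : Int) : List String :=
  (cw.items.filter (fun p => decide (p.2 = mx))).map (fun p => p.1)

theorem pvCreditB_addAll (cw : PySem.Dict String Int) (k mx : Int)
    (hmx : PySem.List.max? cw.values (fun x => x) = some mx) (hpos : 0 < mx)
    (dl : PySem.Dict String Int) :
    pvCreditB cw k dl = pvAddAll (pvMaxKeys cw mx) k dl := by
  unfold pvCreditB pvMaxKeys pvAddAll
  rw [hmx]
  simp only []
  rw [if_pos hpos]

theorem pvCreditA_addAll (cw : PySem.Dict String Int) (mx : Int)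
    (hmx : PySem.List.max? cw.values (fun x => x) = some mx) (hpos : 0 < mx)
    (dl : PySem.Dict String Int) :
    pvCreditA cw dl = pvAddAll (pvMaxKeys cw mx) 1 dl := by
  unfold pvCreditA pvMaxKeys pvAddAll
  rw [hmx]
  simp only []
  rw [if_pos hpos, List.foldl_map, List.foldl_filter]
  apply PySem.List.foldl_congr_mem
  intro dl' p _
  by_cases h : p.2 = mx <;> simp [h]

theorem pvNodup_maxKeys (cw : PySem.Dict String Int) (mx : Int) (hcw : cw.keys.Nodup) :
    (pvMaxKeys cw mx).Nodup := by
  have hsub : List.Sublist (pvMaxKeys cw mx) cw.keys := by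
    unfold pvMaxKeys
    simp only [PySem.Dict.keys]
    exact List.filter_sublist.map _
  exact hcw.sublist hsub

theorem pvNodup_keys_creditB (cw : PySem.Dict String Int) (k : Int) (dl : PySem.Dict String Int)
    (hd : dl.keys.Nodup) : (pvCreditB cw k dl).keys.Nodup := by
  cases hmx : PySem.List.max? cw.values (fun x => x) with
  | none => unfold pvCreditB; rw [hmx]; exact hd
  | some mx =>
    by_cases hpos : 0 < mx
    · rw [pvCreditB_addAll cw k mx hmx hpos]
      exact pvNodup_keys_addAll _ _ _ hd
    · unfold pvCreditB; rw [hmx]; simp only []; rw [if_neg hpos]; exact hd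

theorem pvCreditA_creditB (cw : PySem.Dict String Int) (k : Int) (dl : PySem.Dict String Int)
    (hcw : cw.keys.Nodup) (hd : dl.keys.Nodup) :
    pvCreditA cw (pvCreditB cw k dl) = pvCreditB cw (k + 1) dl := by
  cases hmx : PySem.List.max? cw.values (fun x => x) with
  | none =>
    unfold pvCreditA pvCreditB; rw [hmx]
  | some mx =>
    by_cases hpos : 0 < mx
    · rw [pvCreditB_addAll cw k mx hmx hpos, pvCreditA_addAll cw mx hmx hpos,
        pvCreditB_addAll cw (k+1) mx hmx hpos]
      exact pvAddAll_addAll _ k dl (pvNodup_maxKeys cw mx hcw) hd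
    · unfold pvCreditA pvCreditB; rw [hmx]; simp only []
      rw [if_neg hpos, if_neg hpos, if_neg hpos]

theorem pvCreditA_eq_creditB_one (cw dl : PySem.Dict String Int) :
    pvCreditA cw dl = pvCreditB cw 1 dl := by
  cases hmx : PySem.List.max? cw.values (fun x => x) with
  | none => unfold pvCreditA pvCreditB; rw [hmx]
  | some mx =>
    by_cases hpos : 0 < mx
    · rw [pvCreditB_addAll cw 1 mx hmx hpos, pvCreditA_addAll cw mx hmx hpos]
    · unfold pvCreditA pvCreditB; rw [hmx]; simp only []; rw [if_neg hpos, if_neg hpos]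

theorem pvIter_credit (cw : PySem.Dict String Int) (hcw : cw.keys.Nodup) :
    ∀ (k : Nat) (dl : PySem.Dict String Int), dl.keys.Nodup →
      (pvCreditA cw)^[k + 1] dl = pvCreditB cw ((k : Int) + 1) dl := by
  intro k
  induction k with
  | zero => intro dl _; simpa using (pvCreditA_eq_creditB_one cw dl)
  | succ k ih =>
    intro dl hd
    rw [Function.iterate_succ_apply', ih dl hd,
      pvCreditA_creditB cw ((k : Int) + 1) dl hcw hd]
    congr 1

-- ---- Nodup bookkeeping for the evolving city_wealth ----
theorem pvNodup_keys_erase (d : PySem.Dict String Int) (k : String) (h : d.keys.Nodup) :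
    (d.erase k).keys.Nodup := by
  have hsub : List.Sublist (d.erase k).keys d.keys := by
    simp only [PySem.Dict.keys]
    exact (List.filter_sublist (l := d.items)).map _
  exact h.sublist hsub

theorem pvNodup_keys_apply (pw : PySem.Dict String Int)
    (s : PySem.Dict String String × PySem.Dict String Int) (mv : String × String)
    (h : s.2.keys.Nodup) : ((pvApplyA pw s mv).2).keys.Nodup := by
  unfold pvApplyA
  by_cases h1 : s.1.getD mv.1 "" = mv.2
  · simpa [h1] using h
  · simp only [h1, if_false]
    apply PySem.Dict.nodup_keys_insert
    by_cases h2 : (s.2.insert (s.1.getD mv.1 "") (s.2.getD (s.1.getD mv.1 "") 0 - pw.getD mv.1 0)).getD (s.1.getD mv.1 "") 0 = 0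
    · simp only [h2, if_true]
      exact pvNodup_keys_erase _ _ (PySem.Dict.nodup_keys_insert _ _ _ h)
    · simp only [h2, if_false]
      exact PySem.Dict.nodup_keys_insert _ _ _ h

theorem pvNodup_keys_applyList (pw : PySem.Dict String Int) (l : List (String × String)) :
    ∀ (s : PySem.Dict String String × PySem.Dict String Int), s.2.keys.Nodup →
      ((l.foldl (pvApplyA pw) s).2).keys.Nodup := by
  induction l with
  | nil => intro s h; exact h
  | cons mv l ih =>
    intro s h
    exact ih _ (pvNodup_keys_apply pw s mv h)

-- ---- A's loop over a movement-free gap ----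
theorem pvStepA_move (pw : PySem.Dict String Int) (mbd : PySem.Dict Int (List (String × String)))
    (st : PySem.Dict String String × PySem.Dict String Int × PySem.Dict String Int)
    (day : Int) (hc : mbd.contains day = true) :
    pvStepA pw mbd st day =
      (((mbd.getD day []).foldl (pvApplyA pw) (st.1, st.2.1)).1,
       ((mbd.getD day []).foldl (pvApplyA pw) (st.1, st.2.1)).2,
       pvCreditA st.2.1 st.2.2) := by
  simp [pvStepA, hc]

theorem pvStepA_nomove (pw : PySem.Dict String Int) (mbd : PySem.Dict Int (List (String × String)))
    (st : PySem.Dict String String × PySem.Dict String Int × PySem.Dict String Int)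
    (day : Int) (hc : mbd.contains day = false) :
    pvStepA pw mbd st day = (st.1, st.2.1, pvCreditA st.2.1 st.2.2) := by
  simp [pvStepA, hc]

theorem pvGap (pw : PySem.Dict String Int) (mbd : PySem.Dict Int (List (String × String)))
    (k : Nat) : ∀ (a b : Int)
    (st : PySem.Dict String String × PySem.Dict String Int × PySem.Dict String Int),
    (b - a).toNat = k → (∀ d, a ≤ d → d < b → mbd.contains d = false) →
    (PySem.List.pyRange a b 1).foldl (pvStepA pw mbd) st =
      (st.1, st.2.1, (pvCreditA st.2.1)^[k] st.2.2) := by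
  induction k with
  | zero =>
    intro a b st hk _
    rw [PySem.List.pyRange_one_eq_nil (by omega), List.foldl_nil]
    rfl
  | succ k ih =>
    intro a b st hk hno
    rw [PySem.List.pyRange_one_cons (show a < b by omega), List.foldl_cons,
      pvStepA_nomove pw mbd st a (hno a le_rfl (by omega)),
      ih (a+1) b _ (by omega) (fun d h1 h2 => hno d (by omega) h2)]
    simp only [Function.iterate_succ_apply]

-- ---- B's event loop over one same-day block past the first event: moves only ----
theorem pvEventB_block (pw : PySem.Dict String Int) (B : List (Int × String × String)) :
    ∀ (pc : PySem.Dict String String) (cw dl : PySem.Dict String Int) (cur : Int),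
      (∀ t ∈ B, t.1 < cur) →
      B.foldl (pvEventB pw) (pc, cw, dl, cur)
        = (((B.map (fun t => (t.2.1, t.2.2))).foldl (pvApplyA pw) (pc, cw)).1,
           ((B.map (fun t => (t.2.1, t.2.2))).foldl (pvApplyA pw) (pc, cw)).2, dl, cur) := by
  induction B with
  | nil => intro pc cw dl cur _; rfl
  | cons t B ih =>
    intro pc cw dl cur h
    have ht := h t List.mem_cons_self
    have hstep : pvEventB pw (pc, cw, dl, cur) t
        = ((pvApplyA pw (pc, cw) (t.2.1, t.2.2)).1,
           (pvApplyA pw (pc, cw) (t.2.1, t.2.2)).2, dl, cur) := by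
      simp only [pvEventB, pvMoveB_eq, if_neg (not_le.mpr ht)]
    simp only [List.foldl_cons, List.map_cons, hstep]
    exact ih _ _ _ _ (fun t' h' => h t' (List.mem_cons_of_mem _ h'))

-- all events strictly after the dropped same-day prefix have strictly larger days
theorem pvDropWhile_gt (d1 : Int) (Lt : List (Int × String × String))
    (hp : Lt.Pairwise (fun a b => a.1 ≤ b.1)) (hge : ∀ t ∈ Lt, d1 ≤ t.1) :
    ∀ t ∈ Lt.dropWhile (fun t => decide (t.1 = d1)), d1 < t.1 := by
  induction Lt with
  | nil => simp
  | cons x Lt ih =>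
    intro t ht
    rw [List.dropWhile_cons] at ht
    obtain ⟨hx, hp'⟩ := List.pairwise_cons.mp hp
    by_cases hxd : x.1 = d1
    · simp only [hxd, decide_true, if_true] at ht
      exact ih hp' (fun t' h' => hge t' (List.mem_cons_of_mem _ h')) t ht
    · simp only [hxd, decide_false, Bool.false_eq_true, if_false] at ht
      rcases List.mem_cons.mp ht with rfl | h
      · exact lt_of_le_of_ne (hge t List.mem_cons_self) (fun e => hxd e.symm)
      · have h1 : d1 < x.1 :=
          lt_of_le_of_ne (hge x List.mem_cons_self) (fun e => hxd e.symm)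
        exact lt_of_lt_of_le h1 (hx t h)

-- no movement day remains: A credits every remaining day one by one, B once in bulk
theorem pvRunB_nil (pw : PySem.Dict String Int) (mbd : PySem.Dict Int (List (String × String)))
    (m : Int) (pc : PySem.Dict String String) (cw dl : PySem.Dict String Int) (cur : Int)
    (hcw : cw.keys.Nodup) (hdl : dl.keys.Nodup)
    (hno : ∀ d, cur ≤ d → d ≤ m → mbd.contains d = false) :
    (PySem.List.pyRange cur (m + 1) 1).foldl (pvStepA pw mbd) (pc, cw, dl)
      = (pc, cw, if cur ≤ m then pvCreditB cw (m - cur + 1) dl else dl) := by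
  by_cases hcm : cur ≤ m
  · rw [pvGap pw mbd ((m + 1) - cur).toNat cur (m + 1) (pc, cw, dl) rfl
      (fun d h1 h2 => hno d h1 (by omega)), if_pos hcm]
    have hk : ((m + 1) - cur).toNat = (m - cur).toNat + 1 := by omega
    rw [hk, pvIter_credit cw hcw ((m - cur).toNat) dl hdl]
    have hc2 : (((m - cur).toNat : Int)) + 1 = m - cur + 1 := by omega
    rw [hc2]
  · rw [PySem.List.pyRange_one_eq_nil (by omega), List.foldl_nil, if_neg hcm]

-- ===== main run lemma: A's day loop equals B's event loop plus the tail credit =====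
theorem pvRunB (pw : PySem.Dict String Int) (mbd : PySem.Dict Int (List (String × String)))
    (m : Int) :
    ∀ (k : Nat) (L : List (Int × String × String)), L.length ≤ k →
    ∀ (pc : PySem.Dict String String) (cw dl : PySem.Dict String Int) (cur : Int),
      cw.keys.Nodup → dl.keys.Nodup →
      L.Pairwise (fun a b => a.1 ≤ b.1) →
      (∀ t ∈ L, cur ≤ t.1 ∧ t.1 ≤ m) →
      (∀ d, cur ≤ d → d ≤ m → (mbd.contains d = true ↔ ∃ t ∈ L, t.1 = d)) →
      (∀ d, cur ≤ d → d ≤ m →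
        mbd.getD d [] = (L.filter (fun t => decide (t.1 = d))).map (fun t => (t.2.1, t.2.2))) →
      (PySem.List.pyRange cur (m + 1) 1).foldl (pvStepA pw mbd) (pc, cw, dl)
        = ((L.foldl (pvEventB pw) (pc, cw, dl, cur)).1,
           (L.foldl (pvEventB pw) (pc, cw, dl, cur)).2.1,
           if (L.foldl (pvEventB pw) (pc, cw, dl, cur)).2.2.2 ≤ m then
             pvCreditB (L.foldl (pvEventB pw) (pc, cw, dl, cur)).2.1
               (m - (L.foldl (pvEventB pw) (pc, cw, dl, cur)).2.2.2 + 1)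
               (L.foldl (pvEventB pw) (pc, cw, dl, cur)).2.2.1
           else (L.foldl (pvEventB pw) (pc, cw, dl, cur)).2.2.1) := by
  intro k
  induction k with
  | zero =>
    intro L hlen pc cw dl cur hcw hdl _ _ hiff _
    have hLnil : L = [] := List.eq_nil_of_length_eq_zero (Nat.le_zero.mp hlen)
    subst hLnil
    simp only [List.foldl_nil]
    exact pvRunB_nil pw mbd m pc cw dl cur hcw hdl
      (fun d h1 h2 => by
        cases hc : mbd.contains d with
        | false => rfl
        | true => exact absurd ((hiff d h1 h2).mp hc) (by simp))
  | succ k ih =>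
    intro L hlen pc cw dl cur hcw hdl hpair hbound hiff hgrp
    cases L with
    | nil =>
      simp only [List.foldl_nil]
      exact pvRunB_nil pw mbd m pc cw dl cur hcw hdl
        (fun d h1 h2 => by
          cases hc : mbd.contains d with
          | false => rfl
          | true => exact absurd ((hiff d h1 h2).mp hc) (by simp))
    | cons t0 Lt =>
      obtain ⟨ht0le, hpLt⟩ := List.pairwise_cons.mp hpair
      have hb := hbound t0 List.mem_cons_self
      -- the same-day block of t0 and the strictly later events
      have hsplit : Lt = Lt.takeWhile (fun t => decide (t.1 = t0.1))
          ++ Lt.dropWhile (fun t => decide (t.1 = t0.1)) :=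
        (List.takeWhile_append_dropWhile).symm
      have hB1 : ∀ t ∈ Lt.takeWhile (fun t => decide (t.1 = t0.1)), t.1 = t0.1 :=
        fun t h => of_decide_eq_true (List.mem_takeWhile_imp (p := fun (t : Int × String × String) => decide (t.1 = t0.1)) h)
      have hL' : ∀ t ∈ Lt.dropWhile (fun t => decide (t.1 = t0.1)), t0.1 < t.1 :=
        pvDropWhile_gt t0.1 Lt hpLt ht0le
      have hL'mem : ∀ t ∈ Lt.dropWhile (fun t => decide (t.1 = t0.1)), t ∈ Lt :=
        fun t h => (List.dropWhile_sublist _).mem h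
      -- A side: credit the gap, then day t0.1 with all its moves
      have hno : ∀ d, cur ≤ d → d < t0.1 → mbd.contains d = false := by
        intro d h1 h2
        cases hc : mbd.contains d with
        | false => rfl
        | true =>
          obtain ⟨t, htL, hte⟩ := (hiff d h1 (by omega)).mp hc
          rcases List.mem_cons.mp htL with rfl | hmem
          · omega
          · have := ht0le t hmem; omega
      have hct : mbd.contains t0.1 = true :=
        (hiff t0.1 hb.1 hb.2).mpr ⟨t0, List.mem_cons_self, rfl⟩
      have hft : Lt.filter (fun t => decide (t.1 = t0.1))
          = Lt.takeWhile (fun t => decide (t.1 = t0.1)) := by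
        conv_lhs => rw [hsplit]
        rw [List.filter_append,
          List.filter_eq_self.mpr (fun t h => decide_eq_true (hB1 t h)),
          List.filter_eq_nil_iff.mpr
            (fun t h => by simpa using Int.ne_of_gt (hL' t h)),
          List.append_nil]
      have hmoves : mbd.getD t0.1 []
          = ((t0 :: Lt.takeWhile (fun t => decide (t.1 = t0.1))).map
              (fun t => (t.2.1, t.2.2))) := by
        rw [hgrp t0.1 hb.1 hb.2]
        congr 1
        rw [List.filter_cons]
        simp [hft]
      have hdlt : pvCreditA cw ((pvCreditA cw)^[(t0.1 - cur).toNat] dl)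
          = pvCreditB cw (t0.1 - cur + 1) dl := by
        have h1 : pvCreditA cw ((pvCreditA cw)^[(t0.1 - cur).toNat] dl)
            = (pvCreditA cw)^[(t0.1 - cur).toNat + 1] dl :=
          (Function.iterate_succ_apply' _ _ _).symm
        rw [h1, pvIter_credit cw hcw ((t0.1 - cur).toNat) dl hdl]
        have hc2 : (((t0.1 - cur).toNat : Int)) + 1 = t0.1 - cur + 1 := by omega
        rw [hc2]
      -- B side: the first event credits the whole gap, the rest of the block only moves
      have hev0 : pvEventB pw (pc, cw, dl, cur) t0
          = ((pvApplyA pw (pc, cw) (t0.2.1, t0.2.2)).1,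
             (pvApplyA pw (pc, cw) (t0.2.1, t0.2.2)).2,
             pvCreditB cw (t0.1 - cur + 1) dl, t0.1 + 1) := by
        simp only [pvEventB, pvMoveB_eq, if_pos hb.1]
      have hfold : (t0 :: Lt).foldl (pvEventB pw) (pc, cw, dl, cur)
          = (Lt.dropWhile (fun t => decide (t.1 = t0.1))).foldl (pvEventB pw)
              (((mbd.getD t0.1 []).foldl (pvApplyA pw) (pc, cw)).1,
               ((mbd.getD t0.1 []).foldl (pvApplyA pw) (pc, cw)).2,
               pvCreditB cw (t0.1 - cur + 1) dl, t0.1 + 1) := by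
        conv_lhs => rw [hsplit]
        rw [List.foldl_cons, hev0, List.foldl_append,
          pvEventB_block pw (Lt.takeWhile (fun t => decide (t.1 = t0.1))) _ _ _ _
            (fun t h => by rw [hB1 t h]; omega)]
        rw [hmoves, List.map_cons, List.foldl_cons, Prod.mk.eta]
      rw [PySem.List.pyRange_one_append cur t0.1 (m + 1) hb.1 (by omega), List.foldl_append,
        pvGap pw mbd (t0.1 - cur).toNat cur t0.1 (pc, cw, dl) rfl hno,
        PySem.List.pyRange_one_cons (show t0.1 < m + 1 by omega), List.foldl_cons,
        pvStepA_move pw mbd _ t0.1 hct]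
      simp only [hdlt, hfold]
      exact ih (Lt.dropWhile (fun t => decide (t.1 = t0.1)))
        (le_trans (List.length_dropWhile_le _ _) (by simpa using hlen))
        ((mbd.getD t0.1 []).foldl (pvApplyA pw) (pc, cw)).1
        ((mbd.getD t0.1 []).foldl (pvApplyA pw) (pc, cw)).2
        (pvCreditB cw (t0.1 - cur + 1) dl) (t0.1 + 1)
        (pvNodup_keys_applyList pw _ (pc, cw) hcw)
        (pvNodup_keys_creditB cw _ dl hdl)
        (hpLt.sublist (List.dropWhile_sublist _))
        (fun t ht => ⟨by have := hL' t ht; omega, (hbound t (List.mem_cons_of_mem _ (hL'mem t ht))).2⟩)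
        (fun d h1 h2 => by
          rw [hiff d (by omega) h2]
          constructor
          · rintro ⟨t, htL, hte⟩
            refine ⟨t, ?_, hte⟩
            rcases List.mem_cons.mp htL with rfl | hmem
            · omega
            · conv at hmem => rw [hsplit]
              rcases List.mem_append.mp hmem with hmem' | hmem'
              · have := hB1 t hmem'; omega
              · exact hmem'
          · rintro ⟨t, htL', hte⟩
            exact ⟨t, List.mem_cons_of_mem _ (hL'mem t htL'), hte⟩)
        (fun d h1 h2 => by
          rw [hgrp d (by omega) h2]
          congr 1
          have hftd : Lt.filter (fun t => decide (t.1 = d))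
              = (Lt.dropWhile (fun t => decide (t.1 = t0.1))).filter
                  (fun t => decide (t.1 = d)) := by
            conv_lhs => rw [hsplit]
            rw [List.filter_append,
              List.filter_eq_nil_iff.mpr
                (fun t h => by simpa using (by have := hB1 t h; omega : t.1 ≠ d)),
              List.nil_append]
          rw [List.filter_cons]
          have ht0d : (decide (t0.1 = d)) = false := by
            simpa using (by omega : t0.1 ≠ d)
          rw [ht0d]
          simp only [Bool.false_eq_true, if_false]
          exact hftd)

-- ---- stability of Python's sort: same-day events keep their original order ----
theorem pvFilter_insertBy {α : Type} (key : α → Int) (d : Int) (x : α) (ys : List α)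
    (hys : ys.Pairwise (fun a b => key a ≤ key b)) :
    (PySem.List.insertBy (fun a b => decide (key a < key b)) x ys).filter
        (fun y => decide (key y = d))
      = if key x = d then ys.filter (fun y => decide (key y = d)) ++ [x]
        else ys.filter (fun y => decide (key y = d)) := by
  induction ys with
  | nil => by_cases h : key x = d <;> simp [PySem.List.insertBy, h]
  | cons y ys ih =>
    obtain ⟨hy, hys'⟩ := List.pairwise_cons.mp hys
    show (if decide (key x < key y) = true then x :: y :: ys
          else y :: PySem.List.insertBy (fun a b => decide (key a < key b)) x ys).filter
            (fun y => decide (key y = d)) = _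
    by_cases hlt : key x < key y
    · by_cases hxd : key x = d
      · have hnil : (y :: ys).filter (fun y => decide (key y = d)) = [] := by
          apply List.filter_eq_nil_iff.mpr
          intro z hz
          have : key y ≤ key z := by
            rcases List.mem_cons.mp hz with rfl | h
            · exact le_rfl
            · exact hy z h
          simpa using (by omega : key z ≠ d)
        rw [if_pos (decide_eq_true hlt)]
        simp [hxd, hnil]
      · rw [if_pos (decide_eq_true hlt)]
        simp [hxd]
    · have : (decide (key x < key y)) = false := by simpa using hlt
      simp only [this, Bool.false_eq_true, if_false, List.filter_cons]
      rw [ih hys']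
      by_cases hxd : key x = d <;> by_cases hyd : key y = d <;>
        simp [hxd, hyd, List.filter_cons]

theorem pvFilter_sorted {α : Type} (key : α → Int) (d : Int) (xs : List α) :
    (PySem.List.sorted xs key).filter (fun y => decide (key y = d))
      = xs.filter (fun y => decide (key y = d)) := by
  induction xs using List.reverseRecOn with
  | nil => simp [PySem.List.sorted_eq_foldl_insertBy]
  | append_singleton xs x ih =>
    rw [PySem.List.sorted_eq_foldl_insertBy, List.foldl_append, List.foldl_cons, List.foldl_nil,
      ← PySem.List.sorted_eq_foldl_insertBy,
      pvFilter_insertBy key d x _ (PySem.List.sorted_pairwise xs key), List.filter_append]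
    by_cases h : key x = d <;> simp [h, ih]

-- ---- the grouping dict of A and the initialisation dicts ----
def pvMbd (movements : List (Int × String × String)) : PySem.Dict Int (List (String × String)) :=
  movements.foldl (fun d t => d.modify t.1 [] (· ++ [(t.2.1, t.2.2)])) PySem.Dict.empty

def pvE (t : Int × String × String) : Int × (String × String) := (t.1, (t.2.1, t.2.2))

theorem pvMbd_getD (movements : List (Int × String × String)) (d : Int) :
    (pvMbd movements).getD d []
      = ((movements.map pvE).filter (fun p => p.1 == d)).map (fun p => p.2) := by
  have h : pvMbd movements = (movements.map pvE).foldl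
      (fun d p => d.modify p.1 [] (fun x => x ++ [p.2])) PySem.Dict.empty := by
    rw [List.foldl_map]; rfl
  rw [h, PySem.Dict.getD_foldl_modify_append]
  simp

theorem pvContains_mbd (movements : List (Int × String × String)) (d : Int) :
    (pvMbd movements).contains d = true ↔ d ∈ movements.map (fun t => t.1) := by
  have h := PySem.Dict.keys_foldl_modify_key movements (fun t => t.1)
    ([] : List (String × String)) (fun _ t v => v ++ [(t.2.1, t.2.2)]) PySem.Dict.empty
  rw [PySem.Dict.keys_empty] at h
  rw [PySem.Dict.contains_iff_mem_keys]
  show d ∈ (pvMbd movements).keys ↔ _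
  rw [show (pvMbd movements).keys = PySem.Set.ofList (movements.map (fun t => t.1)) from h,
    PySem.Set.mem_ofList]

theorem pvInit_split (data : List (String × String × Int)) :
    ∀ (a : PySem.Dict String String) (b c : PySem.Dict String Int),
      data.foldl (fun t p => (t.1.insert p.1 p.2.1, t.2.1.insert p.1 p.2.2,
          t.2.2.insert p.2.1 (t.2.2.getD p.2.1 0 + p.2.2))) (a, b, c)
        = (data.foldl (fun d p => d.insert p.1 p.2.1) a,
           data.foldl (fun d p => d.insert p.1 p.2.2) b,
           data.foldl (fun d p => d.insert p.2.1 (d.getD p.2.1 0 + p.2.2)) c) := by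
  induction data with
  | nil => intro a b c; rfl
  | cons p data ih => intro a b c; simp only [List.foldl_cons]; exact ih _ _ _

theorem pvInitA_eq (data : List (String × String × Int)) :
    pvInitA data = (pvPCB data, pvPWB data, pvCWB data) := by
  unfold pvInitA pvPCB pvPWB pvCWB
  exact pvInit_split data _ _ _

theorem pvNodup_CWB (data : List (String × String × Int)) : (pvCWB data).keys.Nodup :=
  PySem.Dict.nodup_keys_foldl_insert_key data (fun p => p.2.1)
    (fun d p => d.getD p.2.1 0 + p.2.2) PySem.Dict.empty
    (by rw [PySem.Dict.keys_empty]; exact List.nodup_nil)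

-- ---- top-level glue: the two days_led dicts coincide ----
theorem pvFinal (data : List (String × String × Int)) (m : Int)
    (movements : List (Int × String × String)) :
    ((PySem.List.pyRange 1 (m + 1) 1).foldl (pvStepA (pvInitA data).2.1 (pvMbd movements))
        ((pvInitA data).1, (pvInitA data).2.2, PySem.Dict.empty)).2.2
      = (if ((PySem.List.sorted
            (movements.filter (fun t => decide (1 ≤ t.1 ∧ t.1 ≤ m))) (fun t => t.1)).foldl
              (pvEventB (pvPWB data)) (pvPCB data, pvCWB data, PySem.Dict.empty, 1)).2.2.2 ≤ m
         then pvCreditB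
            ((PySem.List.sorted
              (movements.filter (fun t => decide (1 ≤ t.1 ∧ t.1 ≤ m))) (fun t => t.1)).foldl
                (pvEventB (pvPWB data)) (pvPCB data, pvCWB data, PySem.Dict.empty, 1)).2.1
            (m - ((PySem.List.sorted
              (movements.filter (fun t => decide (1 ≤ t.1 ∧ t.1 ≤ m))) (fun t => t.1)).foldl
                (pvEventB (pvPWB data)) (pvPCB data, pvCWB data, PySem.Dict.empty, 1)).2.2.2 + 1)
            ((PySem.List.sorted
              (movements.filter (fun t => decide (1 ≤ t.1 ∧ t.1 ≤ m))) (fun t => t.1)).foldl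
                (pvEventB (pvPWB data)) (pvPCB data, pvCWB data, PySem.Dict.empty, 1)).2.2.1
         else ((PySem.List.sorted
            (movements.filter (fun t => decide (1 ≤ t.1 ∧ t.1 ≤ m))) (fun t => t.1)).foldl
              (pvEventB (pvPWB data)) (pvPCB data, pvCWB data, PySem.Dict.empty, 1)).2.2.1) := by
  rw [pvInitA_eq]
  set rel := PySem.List.sorted
    (movements.filter (fun t => decide (1 ≤ t.1 ∧ t.1 ≤ m))) (fun t => t.1) with hrel
  have hmemrel : ∀ t, t ∈ rel ↔ t ∈ movements ∧ 1 ≤ t.1 ∧ t.1 ≤ m := by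
    intro t
    rw [hrel, PySem.List.mem_sorted, List.mem_filter]
    simp
  have hrun := pvRunB (pvPWB data) (pvMbd movements) m rel.length rel le_rfl
    (pvPCB data) (pvCWB data) PySem.Dict.empty 1
    (pvNodup_CWB data)
    (by rw [PySem.Dict.keys_empty]; exact List.nodup_nil)
    (PySem.List.sorted_pairwise _ _)
    (fun t ht => ((hmemrel t).mp ht).2)
    (fun d h1 h2 => by
      rw [pvContains_mbd]
      constructor
      · intro h
        obtain ⟨t, htm, ht1⟩ := List.mem_map.mp h
        exact ⟨t, (hmemrel t).mpr ⟨htm, by omega, by omega⟩, ht1⟩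
      · rintro ⟨t, htr, ht1⟩
        exact List.mem_map.mpr ⟨t, ((hmemrel t).mp htr).1, ht1⟩)
    (fun d h1 h2 => by
      rw [pvMbd_getD, hrel, pvFilter_sorted, List.filter_filter, List.filter_map,
        List.map_map]
      simp only [Function.comp_def]
      have hpq : ∀ t ∈ movements, ((pvE t).1 == d)
          = (decide (t.1 = d) && decide (1 ≤ t.1 ∧ t.1 ≤ m)) := by
        intro t _
        by_cases ht : t.1 = d
        · simp [pvE, ht, h1, h2]
        · simp [pvE, ht]
      rw [List.filter_congr hpq]
      rfl)
  dsimp only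
  rw [hrun]

-- ===== VERDICT (by name: the statement is the Claim_ definition above) =====
theorem billionaires_spec : Claim_equal_billionaires := by
  intro n data m movements _hdom _hpre
  exact congrArg
    (fun d : PySem.Dict String Int =>
      PySem.List.sorted2 d.items (fun p => p.1) (fun p => p.2))
    (pvFinal data m movements)
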